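-- pv_equiv track=rewrite | github.com/hannbal/fun-for-Python | sudu/shudu v1.py | count
-- ===== SOURCE A (Python) =====
-- def count(apple):
--     cnt1=[]
--     row=0
--     for x in apple:
--         col=0
--         for y in x:
--             if len(y)>1:
--                 cnt1.append( [len(y),apple.index(x, row),x.index(y, col)] )
--             col=col+1
--         row=row+1
--     cnt1.sort()
--     return cnt1
-- ===== SOURCE B (Python) =====
-- def count(apple):
--     buckets = {}
--     for row, x in enumerate(apple):
--         for col, y in enumerate(x):
--             n = len(y)
--             if n > 1:
--                 buckets.setdefault(n, []).append([n, row, col])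
--     result = []
--     for n in sorted(buckets):
--         result.extend(buckets[n])
--     return result
-- ===== Notes on version B (the rewrite author's own statement) =====
-- stated objective: faster
-- what changed: B replaces A's final comparison sort of all [count,row,col] triples (and A's list.index scans for row/col) with a counting/bucket sort: triples go into a dict keyed by candidate count during one enumerate-based scan, and the result is the buckets concatenated in ascending key order, preserving row-major insertion order within each bucket.
import Mathlib
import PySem

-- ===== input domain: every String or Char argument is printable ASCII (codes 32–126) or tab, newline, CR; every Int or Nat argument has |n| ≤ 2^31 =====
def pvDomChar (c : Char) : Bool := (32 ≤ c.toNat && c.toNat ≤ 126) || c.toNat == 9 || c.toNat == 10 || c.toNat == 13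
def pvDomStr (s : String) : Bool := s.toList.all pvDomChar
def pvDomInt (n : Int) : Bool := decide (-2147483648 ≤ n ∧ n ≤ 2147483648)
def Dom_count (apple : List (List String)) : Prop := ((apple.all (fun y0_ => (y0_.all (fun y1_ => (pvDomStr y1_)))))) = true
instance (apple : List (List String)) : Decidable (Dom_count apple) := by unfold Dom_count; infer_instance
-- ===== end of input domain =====

-- B replaces A's final comparison sort of all [count,row,col] triples by a bucket (counting) sort
-- keyed on the candidate count, and takes row/col from the loop counters instead of list.index scans.

-- ===== PORT A =====
-- exact port of Python's list.index(v, start) for a nonnegative start (start here is a loop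
-- counter, always ≥ 0): first index ≥ start holding v; none = ValueError
def pyIndexFrom {α : Type} [BEq α] (xs : List α) (v : α) (start : Nat) : Option Int :=
  (PySem.List.index? (xs.drop start) v).map (fun k => ((start + k : Nat) : Int))

def count (apple : List (List String)) : List (List Int) :=
  -- cnt1=[]; row=0; nested for-loops appending [len(y), apple.index(x,row), x.index(y,col)]
  -- (.getD 0 is unreachable: x is at position row of apple, y at position col of x)
  PySem.List.sorted
    ((apple.foldl (fun (acc : List (List Int) × Int) x =>
      ((x.foldl (fun (acc2 : List (List Int) × Int) y =>
        if 1 < PySem.Str.len y then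
          (acc2.1 ++ [[PySem.Str.len y, (pyIndexFrom apple x acc.2.toNat).getD 0,
                       (pyIndexFrom x y acc2.2.toNat).getD 0]], acc2.2 + 1)
        else (acc2.1, acc2.2 + 1)) (acc.1, (0 : Int))).1, acc.2 + 1)) ([], (0 : Int))).1)
    (fun t => t) false

-- ===== PORT B =====
def count_alt (apple : List (List String)) : List (List Int) :=
  -- buckets.setdefault(n, []).append([n, row, col]) over enumerate(apple) / enumerate(x)
  (PySem.List.sorted
      (apple.zipIdx.foldl (fun (d : PySem.Dict Int (List (List Int))) rx =>
        rx.1.zipIdx.foldl (fun d cy =>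
          if 1 < PySem.Str.len cy.1 then
            d.modify (PySem.Str.len cy.1) []
              (fun b => b ++ [[PySem.Str.len cy.1, (rx.2 : Int), (cy.2 : Int)]])
          else d) d) PySem.Dict.empty).keys (fun k => k) false).foldl
    (fun out n => out ++
      (apple.zipIdx.foldl (fun (d : PySem.Dict Int (List (List Int))) rx =>
        rx.1.zipIdx.foldl (fun d cy =>
          if 1 < PySem.Str.len cy.1 then
            d.modify (PySem.Str.len cy.1) []
              (fun b => b ++ [[PySem.Str.len cy.1, (rx.2 : Int), (cy.2 : Int)]])
          else d) d) PySem.Dict.empty).getD n []) []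

-- ===== PRECONDITION & SPEC =====
def Spec_count (apple : List (List String)) (out : List (List Int)) : Prop := out = count_alt apple
instance (apple : List (List String)) (out : List (List Int)) : Decidable (Spec_count apple out) := by unfold Spec_count; infer_instance

-- ===== CLAIM (what is proved, stated in full; the proofs are below) =====
def Claim_equal_count : Prop := ∀ (apple : List (List String)), Dom_count apple → Spec_count apple (count apple)

-- ===== LEMMAS AND PROOFS =====

-- the head of a triple (its candidate count)
def pvHd (t : List Int) : Int := t.headD 0

-- canonical row-major list of triples
def pvRow (r : Nat) (x : List String) : List (List Int) :=
  ((x.zipIdx).filter (fun cy => decide (1 < PySem.Str.len cy.1))).map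
    (fun cy => [PySem.Str.len cy.1, (r : Int), (cy.2 : Int)])

def pvAll (apple : List (List String)) : List (List Int) :=
  apple.zipIdx.flatMap (fun rx => pvRow rx.2 rx.1)

-- the (key, triple) pairs B feeds into its buckets, in row-major order
def pvPairs (apple : List (List String)) : List (Int × List Int) :=
  apple.zipIdx.flatMap (fun rx =>
    ((rx.1.zipIdx).filter (fun cy => decide (1 < PySem.Str.len cy.1))).map
      (fun cy => (PySem.Str.len cy.1, [PySem.Str.len cy.1, (rx.2 : Int), (cy.2 : Int)])))

lemma pyIndexFrom_at {α : Type} [BEq α] [LawfulBEq α] (pre suf : List α) (v : α) :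
    pyIndexFrom (pre ++ v :: suf) v pre.length = some (pre.length : Int) := by
  simp [pyIndexFrom, List.idxOf?_cons]

lemma innerA (x : List String) (R : Int) :
    ∀ (suf pre : List String) (c : List (List Int)), x = pre ++ suf →
    suf.foldl (fun (acc2 : List (List Int) × Int) y =>
      if 1 < PySem.Str.len y then
        (acc2.1 ++ [[PySem.Str.len y, R, (pyIndexFrom x y acc2.2.toNat).getD 0]], acc2.2 + 1)
      else (acc2.1, acc2.2 + 1)) (c, (pre.length : Int))
    = (c ++ ((suf.zipIdx pre.length).filter (fun cy => decide (1 < PySem.Str.len cy.1))).map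
        (fun cy => [PySem.Str.len cy.1, R, (cy.2 : Int)]), (x.length : Int)) := by
  intro suf
  induction suf with
  | nil => intro pre c h; subst h; simp
  | cons y ys ih =>
    intro pre c h
    simp only [List.foldl_cons, Int.toNat_natCast]
    rw [h, pyIndexFrom_at, ← h]
    by_cases hy : 1 < PySem.Str.len y
    · rw [if_pos hy]
      have h2 : x = (pre ++ [y]) ++ ys := by simp [h]
      have := ih (pre ++ [y]) (c ++ [[PySem.Str.len y, R, (pre.length : Int)]]) h2
      simp only [List.length_append, List.length_cons, List.length_nil, Option.getD_some] at this ⊢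
      push_cast at this ⊢
      rw [this]
      have hyn : 1 < y.length := by simp [pysem] at hy; exact_mod_cast hy
      simp [List.zipIdx_cons, hyn]
    · rw [if_neg hy]
      have h2 : x = (pre ++ [y]) ++ ys := by simp [h]
      have := ih (pre ++ [y]) c h2
      simp only [List.length_append, List.length_cons, List.length_nil] at this ⊢
      push_cast at this ⊢
      rw [this]
      have hyn : ¬ 1 < y.length := by simp [pysem] at hy; omega
      simp [List.zipIdx_cons, hyn]

lemma outerA (apple : List (List String)) :
    ∀ (suf pre : List (List String)) (c : List (List Int)), apple = pre ++ suf →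
    (suf.foldl (fun (acc : List (List Int) × Int) x =>
      ((x.foldl (fun (acc2 : List (List Int) × Int) y =>
        if 1 < PySem.Str.len y then
          (acc2.1 ++ [[PySem.Str.len y, (pyIndexFrom apple x acc.2.toNat).getD 0,
                       (pyIndexFrom x y acc2.2.toNat).getD 0]], acc2.2 + 1)
        else (acc2.1, acc2.2 + 1)) (acc.1, (0 : Int))).1, acc.2 + 1)) (c, (pre.length : Int))).1
    = c ++ (suf.zipIdx pre.length).flatMap (fun rx => pvRow rx.2 rx.1) := by
  intro suf
  induction suf with
  | nil => intro pre c h; simp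
  | cons x ys ih =>
    intro pre c h
    simp only [List.foldl_cons, Int.toNat_natCast]
    rw [h, pyIndexFrom_at, ← h]
    have hin := innerA x ((pre.length : Int)) x [] c (by simp)
    simp only [List.length_nil, Nat.cast_zero, Option.getD_some] at hin ⊢
    rw [hin]
    have := ih (pre ++ [x]) (c ++ (pvRow pre.length x)) (by simp [h])
    simp only [List.length_append, List.length_cons, List.length_nil] at this
    push_cast at this ⊢
    rw [show (x.zipIdx.filter (fun cy => decide (1 < PySem.Str.len cy.1))).map
        (fun cy => [PySem.Str.len cy.1, (pre.length : Int), (cy.2 : Int)]) = pvRow pre.length x from rfl]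
    rw [this]
    simp [List.zipIdx_cons, List.flatMap_cons]

lemma countA_eq (apple : List (List String)) :
    count apple = PySem.List.sorted (pvAll apple) (fun t => t) false := by
  have h := outerA apple apple [] [] rfl
  simp only [List.length_nil, Nat.cast_zero, List.nil_append] at h
  unfold count
  rw [h]
  rfl

lemma bucketsB (apple : List (List String)) :
    apple.zipIdx.foldl (fun (d : PySem.Dict Int (List (List Int))) rx =>
        rx.1.zipIdx.foldl (fun d cy =>
          if 1 < PySem.Str.len cy.1 then
            d.modify (PySem.Str.len cy.1) []
              (fun b => b ++ [[PySem.Str.len cy.1, (rx.2 : Int), (cy.2 : Int)]])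
          else d) d) PySem.Dict.empty
    = (pvPairs apple).foldl (fun d p => d.modify p.1 [] (fun b => b ++ [p.2]))
        PySem.Dict.empty := by
  rw [pvPairs, List.foldl_flatMap]
  congr 1
  funext d rx
  have h1 := PySem.List.foldl_ite_eq_foldl_filter
      (fun cy : String × Nat => 1 < PySem.Str.len cy.1)
      (fun (d : PySem.Dict Int (List (List Int))) cy =>
        d.modify (PySem.Str.len cy.1) []
          (fun b => b ++ [[PySem.Str.len cy.1, (rx.2 : Int), (cy.2 : Int)]]))
      rx.1.zipIdx d
  rw [h1, List.foldl_map]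

lemma pvPairs_eq (apple : List (List String)) :
    pvPairs apple = (pvAll apple).map (fun t => (pvHd t, t)) := by
  simp [pvPairs, pvAll, pvRow, List.map_flatMap, List.map_map, Function.comp_def, pvHd]

lemma countB_eq (apple : List (List String)) :
    count_alt apple
    = (PySem.List.sorted (PySem.Set.ofList ((pvAll apple).map pvHd)) (fun k => k) false).flatMap
        (fun n => (pvAll apple).filter (fun t => pvHd t == n)) := by
  unfold count_alt
  rw [bucketsB, PySem.List.foldl_append_eq_flatMap, List.nil_append]
  have hkeys : ((pvPairs apple).foldl (fun d p => d.modify p.1 [] (fun b => b ++ [p.2]))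
      PySem.Dict.empty).keys = PySem.Set.ofList ((pvAll apple).map pvHd) := by
    rw [PySem.Dict.keys_foldl_modify_key (pvPairs apple) (fun p => p.1) [] (fun _ p b => b ++ [p.2])]
    rw [pvPairs_eq, List.map_map]
    rfl
  rw [hkeys]
  congr 1
  funext n
  rw [PySem.Dict.getD_foldl_modify_append (pvPairs apple) PySem.Dict.empty n]
  rw [pvPairs_eq, List.filter_map, List.map_map]
  simp [Function.comp_def]

lemma count_filter_hd (L : List (List Int)) (k : Int) (a : List Int) :
    (L.filter (fun t => pvHd t == k)).count a = if pvHd a == k then L.count a else 0 := by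
  by_cases h : pvHd a == k
  · rw [if_pos h]
    exact List.count_filter h
  · rw [if_neg h]
    refine List.count_eq_zero_of_not_mem ?_
    intro hm
    exact h (List.mem_filter.mp hm).2

lemma count_flat_buckets (L : List (List Int)) :
    ∀ (ks : List Int), ks.Nodup → ∀ (a : List Int),
    (ks.flatMap (fun k => L.filter (fun t => pvHd t == k))).count a
    = if pvHd a ∈ ks then L.count a else 0 := by
  intro ks
  induction ks with
  | nil => simp
  | cons k ks ih =>
    intro hnd a
    rw [List.flatMap_cons, List.count_append, count_filter_hd, ih hnd.of_cons a]
    by_cases h1 : pvHd a = k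
    · have h2 : k ∉ ks := (List.nodup_cons.mp hnd).1
      simp [h1, h2]
    · simp [h1, beq_iff_eq]

lemma zipIdx_pairwise {α : Type} : ∀ (x : List α) (n : Nat),
    (x.zipIdx n).Pairwise (fun p q => p.2 < q.2) := by
  intro x
  induction x with
  | nil => intro n; simp
  | cons a xs ih =>
    intro n
    rw [List.zipIdx_cons]
    refine List.Pairwise.cons ?_ (ih (n + 1))
    intro q hq
    have := List.mem_zipIdx (x := q.1) (i := q.2) (k := n + 1) (by simpa using hq)
    omega

lemma pvAll_shape (apple : List (List String)) :
    ∀ t ∈ pvAll apple, ∃ n r c : Int, t = [n, r, c] := by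
  intro t ht
  simp only [pvAll, pvRow, List.mem_flatMap, List.mem_map, List.mem_filter] at ht
  obtain ⟨rx, _, cy, _, rfl⟩ := ht
  exact ⟨_, _, _, rfl⟩

lemma pvAll_pairwise (apple : List (List String)) :
    (pvAll apple).Pairwise (fun a b => a.tail < b.tail) := by
  rw [pvAll, List.flatMap_def, List.pairwise_flatten]
  constructor
  · intro l hl
    simp only [List.mem_map] at hl
    obtain ⟨rx, _, rfl⟩ := hl
    rw [pvRow, List.pairwise_map]
    refine ((zipIdx_pairwise rx.1 0).filter _).imp_of_mem ?_
    intro cy dz _ _ hlt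
    simp only [List.tail_cons]
    simp [List.cons_lt_cons_iff]
    omega
  · rw [List.pairwise_map]
    refine (zipIdx_pairwise apple 0).imp_of_mem ?_
    intro rx1 rx2 _ _ hlt x hx y hy
    simp only [pvRow, List.mem_map, List.mem_filter] at hx hy
    obtain ⟨cy, _, rfl⟩ := hx
    obtain ⟨dz, _, rfl⟩ := hy
    simp only [List.tail_cons]
    simp [List.cons_lt_cons_iff]
    omega

lemma main_sorted (L : List (List Int))
    (hshape : ∀ t ∈ L, ∃ n r c : Int, t = [n, r, c])
    (hpw : L.Pairwise (fun a b => a.tail < b.tail)) :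
    PySem.List.sorted L (fun t => t) false
    = (PySem.List.sorted (PySem.Set.ofList (L.map pvHd)) (fun k => k) false).flatMap
        (fun n => L.filter (fun t => pvHd t == n)) := by
  have hnd : (PySem.List.sorted (PySem.Set.ofList (L.map pvHd)) (fun k => k) false).Nodup :=
    (PySem.List.sorted_perm _ _ _).symm.nodup (PySem.Set.nodup_ofList _)
  have hperm : ((PySem.List.sorted (PySem.Set.ofList (L.map pvHd)) (fun k => k) false).flatMap
      (fun n => L.filter (fun t => pvHd t == n))).Perm L := by
    rw [List.perm_iff_count]
    intro a
    rw [count_flat_buckets L _ hnd a]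
    by_cases hm : a ∈ L
    · rw [if_pos]
      rw [PySem.List.mem_sorted]
      exact (PySem.Set.mem_ofList _ _).mpr (List.mem_map_of_mem hm)
    · rw [List.count_eq_zero_of_not_mem hm]
      simp
  have hpair : List.Pairwise (fun (a b : List Int) => a < b)
      ((PySem.List.sorted (PySem.Set.ofList (L.map pvHd)) (fun k => k) false).flatMap
        (fun n => L.filter (fun t => pvHd t == n))) := by
    rw [List.flatMap_def, List.pairwise_flatten]
    constructor
    · intro l hl
      simp only [List.mem_map] at hl
      obtain ⟨k, hk, rfl⟩ := hl
      refine (hpw.filter _).imp_of_mem ?_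
      intro a b ha hb hlt
      have ha2 := List.mem_filter.mp ha
      have hb2 := List.mem_filter.mp hb
      obtain ⟨n1, r1, c1, rfl⟩ := hshape _ ha2.1
      obtain ⟨n2, r2, c2, rfl⟩ := hshape _ hb2.1
      have e1 : n1 = k := by simpa [pvHd] using ha2.2
      have e2 : n2 = k := by simpa [pvHd] using hb2.2
      subst e1; subst e2
      simp only [List.tail_cons] at hlt
      simp [hlt]
    · rw [List.pairwise_map]
      refine (PySem.List.sorted_ofList_pairwise_lt _).imp_of_mem ?_
      intro k1 k2 _ _ hlt x hx y hy
      have hx2 := List.mem_filter.mp hx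
      have hy2 := List.mem_filter.mp hy
      obtain ⟨n1, r1, c1, rfl⟩ := hshape _ hx2.1
      obtain ⟨n2, r2, c2, rfl⟩ := hshape _ hy2.1
      have e1 : n1 = k1 := by simpa [pvHd] using hx2.2
      have e2 : n2 = k2 := by simpa [pvHd] using hy2.2
      subst e1; subst e2
      simp [List.cons_lt_cons_iff, hlt]
  have key := PySem.List.sorted_eq_of_perm_of_pairwise_lt L _ (fun t => t) hperm hpair
  convert key using 2

-- ===== VERDICT (by name: the statement is the Claim_ definition above) =====
theorem count_spec : Claim_equal_count := by
  intro apple _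
  unfold Spec_count
  rw [countA_eq, countB_eq, main_sorted (pvAll apple) (pvAll_shape apple) (pvAll_pairwise apple)]
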